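-- pv_equiv track=rewrite | github.com/johnutt/comp110-23s-workspace | exercises/ex07/dictionary.py | count
-- ===== SOURCE A (Python) =====
-- def count(input: list[str]) -> dict[str, int]:
--     """Counts the amount of string values in a list."""
--     output: dict[str, int] = {}
--     for x in input:
--         current: str = x
--         if current in output:
--             output[x] += 1
--         else:
--             output[x] = 1
--     return output
-- ===== SOURCE B (Python) =====
-- def count(input: list[str]) -> dict[str, int]:
--     """Counts the amount of string values in a list."""
--     keys = list(dict.fromkeys(input))
--     return {k: input.count(k) for k in keys}
-- ===== Notes on version B (the rewrite author's own statement) =====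
-- stated objective: alternative
-- what changed: B replaces the running dict-accumulator loop with a two-pass scheme: an order-preserving dedup of the keys followed by a comprehension that counts each distinct key with list.count.
import Mathlib
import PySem

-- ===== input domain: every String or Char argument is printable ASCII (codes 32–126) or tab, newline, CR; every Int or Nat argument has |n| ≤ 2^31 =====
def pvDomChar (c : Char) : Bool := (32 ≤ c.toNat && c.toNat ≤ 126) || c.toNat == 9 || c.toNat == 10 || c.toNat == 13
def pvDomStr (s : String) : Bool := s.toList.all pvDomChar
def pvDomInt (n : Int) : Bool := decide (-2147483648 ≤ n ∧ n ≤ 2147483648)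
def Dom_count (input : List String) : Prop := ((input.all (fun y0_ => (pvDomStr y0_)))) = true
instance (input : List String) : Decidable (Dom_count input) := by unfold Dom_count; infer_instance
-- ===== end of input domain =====

-- B replaces A's running dict-accumulator loop with ordered key dedup followed by a per-key count pass (alternative decomposition, same results).


-- ===== PORT A =====
-- for x in input: if x in output: output[x] = output[x] + 1 else: output[x] = 1
def count (input : List String) : List (String × Int) :=
  (input.foldl
    (fun (output : PySem.Dict String Int) x =>
      if output.contains x then output.insert x (output.getD x 0 + 1)
      else output.insert x 1)
    PySem.Dict.empty).items

-- ===== PORT B =====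
-- keys = list(dict.fromkeys(input)); {k: input.count(k) for k in keys}
def count_alt (input : List String) : List (String × Int) :=
  (PySem.List.dedup input).map (fun k => (k, (input.count k : Int)))

-- ===== PRECONDITION & SPEC =====
def Spec_count (input : List String) (out : List (String × Int)) : Prop := out = count_alt input
instance (input : List String) (out : List (String × Int)) : Decidable (Spec_count input out) := by unfold Spec_count; infer_instance

-- ===== CLAIM (what is proved, stated in full; the proofs are below) =====
def Claim_equal_count : Prop := ∀ (input : List String), Dom_count input → Spec_count input (count input)

-- ===== LEMMAS AND PROOFS =====
theorem count_step_eq :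
    (fun (output : PySem.Dict String Int) x =>
      if output.contains x then output.insert x (output.getD x 0 + 1)
      else output.insert x 1)
    = (fun (d : PySem.Dict String Int) x => d.insert x (d.getD x 0 + 1)) := by
  funext d x
  by_cases h : d.contains x = true
  · simp [h]
  · have h0 : d.getD x 0 = 0 := by
      apply PySem.Dict.getD_of_not_contains
      simpa using h
    simp [h, h0]

-- ===== VERDICT (by name: the statement is the Claim_ definition above) =====
theorem count_spec : Claim_equal_count := by
  intro input _
  unfold Spec_count count count_alt
  rw [count_step_eq, PySem.Dict.foldl_insert_getD_add_one_eq_counter,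
    PySem.Dict.items_counter, PySem.List.dedup_eq_ofList]
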